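-- pv_equiv track=rewrite | github.com/chenhao-dendi/FinSynapse | scripts/compare_eval_fixtures.py | _fmt_missing_summary
-- ===== SOURCE A (Python) =====
-- from typing import Any
--
-- def _fmt_missing_summary(rows: list[dict[str, Any]]) -> str:
--     if not rows:
--         return "none"
--     counts: dict[str, int] = {}
--     for row in rows:
--         indicator = row["indicator"]
--         counts[indicator] = counts.get(indicator, 0) + 1
--     return ", ".join(f"`{indicator}`={count}" for indicator, count in sorted(counts.items()))
-- ===== SOURCE B (Python) =====
-- def _fmt_missing_summary(rows):
--     if not rows:
--         return "none"
--     inds = sorted(row["indicator"] for row in rows)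
--     parts = []
--     i = 0
--     n = len(inds)
--     while i < n:
--         j = i
--         while j < n and inds[j] == inds[i]:
--             j += 1
--         parts.append(f"`{inds[i]}`={j - i}")
--         i = j
--     return ", ".join(parts)
-- ===== Notes on version B (the rewrite author's own statement) =====
-- stated objective: alternative
-- what changed: B replaces A's hash-table counting (dict of counts, then sort the items) by sorting the full list of indicators once and emitting run-length counts of consecutive equal runs with a two-pointer scan.
import Mathlib
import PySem

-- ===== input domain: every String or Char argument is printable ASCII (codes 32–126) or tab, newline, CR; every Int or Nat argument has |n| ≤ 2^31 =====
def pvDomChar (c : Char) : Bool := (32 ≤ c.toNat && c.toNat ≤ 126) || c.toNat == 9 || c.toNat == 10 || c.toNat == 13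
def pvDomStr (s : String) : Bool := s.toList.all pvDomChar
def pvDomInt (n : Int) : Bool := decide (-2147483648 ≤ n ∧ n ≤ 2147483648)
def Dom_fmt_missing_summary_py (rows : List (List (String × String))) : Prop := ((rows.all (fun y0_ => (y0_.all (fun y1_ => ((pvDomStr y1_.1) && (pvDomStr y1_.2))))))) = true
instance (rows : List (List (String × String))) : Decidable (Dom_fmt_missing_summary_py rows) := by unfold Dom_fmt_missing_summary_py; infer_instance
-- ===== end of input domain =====

-- B sorts the whole indicator list and run-length-counts consecutive runs instead of
-- A's dict-counting followed by sorting the items; same output (objective: alternative).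

-- ===== PORT A =====
def fmt_missing_summary_py (rows : List (List (String × String))) : String :=
  if rows = [] then "none"
  else
    let counts : PySem.Dict String Int :=
      rows.foldl (fun d row =>
        let indicator := (PySem.Dict.ofList row).getD "indicator" ""
        d.insert indicator (d.getD indicator 0 + 1)) PySem.Dict.empty
    PySem.Str.join ", "
      ((PySem.List.sorted2 counts.items Prod.fst Prod.snd).map
        (fun p => "`" ++ p.1 ++ "`=" ++ PySem.Int.toStr p.2))

-- ===== PORT B =====
-- the two-pointer run-length scan of Source B: one run per recursive step
def pvRleFmt : List String → List String
  | [] => []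
  | x :: xs =>
      ("`" ++ x ++ "`=" ++ PySem.Int.toStr (((xs.takeWhile (fun y => y == x)).length : Int) + 1))
        :: pvRleFmt (xs.dropWhile (fun y => y == x))
termination_by l => l.length
decreasing_by
  have := List.Sublist.length_le (List.dropWhile_sublist (l := xs) (fun y => y == x))
  simp; omega

def fmt_missing_summary_py_alt (rows : List (List (String × String))) : String :=
  if rows = [] then "none"
  else
    let inds := PySem.List.sorted
      (rows.map (fun row => (PySem.Dict.ofList row).getD "indicator" "")) (fun x => x)
    PySem.Str.join ", " (pvRleFmt inds)

-- ===== PRECONDITION & SPEC =====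
-- Pre_ excludes rows missing the "indicator" key, where A raises KeyError.
def Pre_fmt_missing_summary_py (rows : List (List (String × String))) : Prop :=
  ∀ row ∈ rows, "indicator" ∈ row.map Prod.fst
instance (rows : List (List (String × String))) : Decidable (Pre_fmt_missing_summary_py rows) := by unfold Pre_fmt_missing_summary_py; infer_instance

def pvWitness_fmt_missing_summary_py : (List (List (String × String))) :=
  [[("indicator", "rsi")], [("indicator", "macd")], [("indicator", "rsi")]]

def Spec_fmt_missing_summary_py (rows : List (List (String × String))) (out : String) : Prop := out = fmt_missing_summary_py_alt rows
instance (rows : List (List (String × String))) (out : String) : Decidable (Spec_fmt_missing_summary_py rows out) := by unfold Spec_fmt_missing_summary_py; infer_instance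

-- ===== CLAIM (what is proved, stated in full; the proofs are below) =====
def Claim_equal_fmt_missing_summary_py : Prop := ∀ (rows : List (List (String × String))), Dom_fmt_missing_summary_py rows → Pre_fmt_missing_summary_py rows → Spec_fmt_missing_summary_py rows (fmt_missing_summary_py rows)

-- ===== LEMMAS AND PROOFS =====

-- the distinct keys of a sorted list, in order (first element of each run)
def pvKeys : List String → List String
  | [] => []
  | x :: xs => x :: pvKeys (xs.dropWhile (fun y => y == x))
termination_by l => l.length
decreasing_by
  have := List.Sublist.length_le (List.dropWhile_sublist (l := xs) (fun y => y == x))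
  simp; omega

lemma pv_sorted_head_lt (x : String) (xs : List String)
    (h : (x :: xs).Pairwise (· ≤ ·)) :
    ∀ y ∈ xs.dropWhile (fun y => y == x), x < y := by
  induction xs with
  | nil => intro y hy; simp at hy
  | cons a xs ih =>
    intro y hy
    rw [List.dropWhile_cons] at hy
    by_cases hax : (a == x) = true
    · simp only [hax, if_true] at hy
      have h' : (x :: xs).Pairwise (· ≤ ·) :=
        h.sublist (List.Sublist.cons₂ x (List.sublist_cons_self a xs))
      exact ih h' y hy
    · simp only [hax, if_false, Bool.false_eq_true] at hy
      have hxa : x ≤ a := (List.pairwise_cons.mp h).1 a (by simp)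
      have hne : x ≠ a := fun e => hax (by simp [e.symm])
      rcases List.mem_cons.mp hy with rfl | hy'
      · exact lt_of_le_of_ne hxa hne
      · have hpa : (a :: xs).Pairwise (· ≤ ·) := (List.pairwise_cons.mp h).2
        have hay : a ≤ y := (List.pairwise_cons.mp hpa).1 y hy'
        exact lt_of_lt_of_le (lt_of_le_of_ne hxa hne) hay

lemma pv_mem_pvKeys (S : List String) (h : S.Pairwise (· ≤ ·)) (a : String) :
    a ∈ pvKeys S ↔ a ∈ S := by
  induction S using pvKeys.induct with
  | case1 => simp [pvKeys]
  | case2 x xs ih =>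
    have htail : xs.Pairwise (· ≤ ·) := (List.pairwise_cons.mp h).2
    have hrest : (xs.dropWhile (fun y => y == x)).Pairwise (· ≤ ·) :=
      htail.sublist (List.dropWhile_sublist _)
    rw [pvKeys]
    simp only [List.mem_cons]
    rw [ih hrest]
    constructor
    · rintro (rfl | hm)
      · exact Or.inl rfl
      · exact Or.inr ((List.dropWhile_sublist _).subset hm)
    · rintro (rfl | hm)
      · exact Or.inl rfl
      · by_cases hd : a ∈ xs.dropWhile (fun y => y == x)
        · exact Or.inr hd
        · left
          have hsplit := List.takeWhile_append_dropWhile (p := fun y => y == x) (l := xs)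
          rw [← hsplit] at hm
          rcases List.mem_append.mp hm with h1 | h2
          · have := List.mem_takeWhile_imp h1
            simpa using this
          · exact absurd h2 hd

lemma pv_pvKeys_pairwise (S : List String) (h : S.Pairwise (· ≤ ·)) :
    (pvKeys S).Pairwise (· < ·) := by
  induction S using pvKeys.induct with
  | case1 => simp [pvKeys]
  | case2 x xs ih =>
    have htail : xs.Pairwise (· ≤ ·) := (List.pairwise_cons.mp h).2
    have hrest : (xs.dropWhile (fun y => y == x)).Pairwise (· ≤ ·) :=
      htail.sublist (List.dropWhile_sublist _)
    rw [pvKeys, List.pairwise_cons]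
    refine ⟨fun k hk => ?_, ih hrest⟩
    exact pv_sorted_head_lt x xs h k ((pv_mem_pvKeys _ hrest k).mp hk)

lemma pv_rle_eq (S : List String) (h : S.Pairwise (· ≤ ·)) :
    pvRleFmt S = (pvKeys S).map
      (fun k => "`" ++ k ++ "`=" ++ PySem.Int.toStr ((S.count k : Int))) := by
  induction S using pvKeys.induct with
  | case1 => simp [pvRleFmt, pvKeys]
  | case2 x xs ih =>
    have htail : xs.Pairwise (· ≤ ·) := (List.pairwise_cons.mp h).2
    have hrest : (xs.dropWhile (fun y => y == x)).Pairwise (· ≤ ·) :=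
      htail.sublist (List.dropWhile_sublist _)
    have hnot : x ∉ xs.dropWhile (fun y => y == x) := fun hmem =>
      absurd rfl (ne_of_gt (pv_sorted_head_lt x xs h x hmem))
    have hsplit := List.takeWhile_append_dropWhile (p := fun y => y == x) (l := xs)
    rw [pvRleFmt, pvKeys, List.map_cons, ih hrest]
    have hcnt : (x :: xs).count x = (xs.takeWhile (fun y => y == x)).length + 1 := by
      have h1 : (xs.takeWhile (fun y => y == x)).count x
          = (xs.takeWhile (fun y => y == x)).length :=
        List.count_eq_length.mpr (fun b hb =>
          (by simpa using List.mem_takeWhile_imp hb : b = x).symm)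
      have h2 : (xs.dropWhile (fun y => y == x)).count x = 0 :=
        List.count_eq_zero.mpr hnot
      have h3 : (x :: xs).count x = xs.count x + 1 := by simp
      have h4 : xs.count x = (xs.takeWhile (fun y => y == x)).length := by
        conv_lhs => rw [← hsplit]
        rw [List.count_append, h1, h2]; omega
      rw [h3, h4]
    refine congrArg₂ (· :: ·) ?_ ?_
    · rw [hcnt]; push_cast; rfl
    · apply List.map_congr_left
      intro k hk
      have hkmem : k ∈ xs.dropWhile (fun y => y == x) := (pv_mem_pvKeys _ hrest k).mp hk
      have hkx : x < k := pv_sorted_head_lt x xs h k hkmem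
      have hkne : k ≠ x := fun e => absurd e.symm (ne_of_lt hkx)
      have hc : (x :: xs).count k = (xs.dropWhile (fun y => y == x)).count k := by
        have htw : (xs.takeWhile (fun y => y == x)).count k = 0 :=
          List.count_eq_zero.mpr (fun hm => hkne (by simpa using List.mem_takeWhile_imp hm))
        calc (x :: xs).count k = xs.count k := by simp [Ne.symm hkne]
          _ = ((xs.takeWhile (fun y => y == x)) ++ (xs.dropWhile (fun y => y == x))).count k := by
                rw [hsplit]
          _ = (xs.dropWhile (fun y => y == x)).count k := by
                rw [List.count_append, htw]; omega
      rw [hc]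

lemma pv_insertBy_congr {α : Type} (before before' : α → α → Bool) (x : α) (ys : List α)
    (h : ∀ y ∈ ys, before x y = before' x y) :
    PySem.List.insertBy before x ys = PySem.List.insertBy before' x ys := by
  induction ys with
  | nil => rfl
  | cons y ys ih =>
    have e1 : PySem.List.insertBy before x (y :: ys)
        = if before x y then x :: y :: ys else y :: PySem.List.insertBy before x ys := rfl
    have e2 : PySem.List.insertBy before' x (y :: ys)
        = if before' x y then x :: y :: ys else y :: PySem.List.insertBy before' x ys := rfl
    rw [e1, e2, h y (by simp), ih (fun z hz => h z (by simp [hz]))]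

lemma pv_foldl_insertBy_congr {α : Type} (before before' : α → α → Bool) :
    ∀ (xs acc : List α), (acc ++ xs).Nodup →
    (∀ a b, a ∈ xs → b ∈ acc ++ xs → a ≠ b → before a b = before' a b) →
    xs.foldl (fun acc x => PySem.List.insertBy before x acc) acc
      = xs.foldl (fun acc x => PySem.List.insertBy before' x acc) acc := by
  intro xs
  induction xs with
  | nil => intro acc _ _; rfl
  | cons x xs ih =>
    intro acc hnd hagree
    have hdisj : List.Disjoint acc (x :: xs) := List.disjoint_of_nodup_append hnd
    have hins : PySem.List.insertBy before x acc = PySem.List.insertBy before' x acc := by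
      apply pv_insertBy_congr
      intro y hy
      refine hagree x y (by simp) (by simp [hy]) (fun e => ?_)
      exact hdisj (e ▸ hy) (by simp)
    have hperm : (PySem.List.insertBy before' x acc).Perm (x :: acc) :=
      PySem.List.insertBy_perm before' x acc
    have hperm2 : ((PySem.List.insertBy before' x acc) ++ xs).Perm (acc ++ x :: xs) :=
      (hperm.append_right xs).trans List.perm_middle.symm
    simp only [List.foldl_cons]
    rw [hins]
    apply ih
    · exact hperm2.nodup_iff.mpr hnd
    · intro a b ha hb hne
      refine hagree a b (by simp [ha]) ?_ hne
      rcases List.mem_append.mp hb with hb1 | hb2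
      · have : b ∈ x :: acc := hperm.subset hb1
        rcases List.mem_cons.mp this with rfl | hb3
        · simp
        · simp [hb3]
      · simp [hb2]

lemma pv_sorted2_eq_sorted_fst (l : List (String × Int))
    (h : (l.map Prod.fst).Nodup) :
    PySem.List.sorted2 l Prod.fst Prod.snd = PySem.List.sorted l Prod.fst := by
  have hinj : ∀ a ∈ l, ∀ b ∈ l, a.1 = b.1 → a = b := List.inj_on_of_nodup_map h
  have e : PySem.List.sorted2 l Prod.fst Prod.snd
      = l.foldl (fun acc x => PySem.List.insertBy
          (fun a b => decide (a.1 < b.1) || (!decide (b.1 < a.1) && decide (a.2 < b.2))) x acc) [] := rfl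
  rw [e, PySem.List.sorted_eq_foldl_insertBy]
  apply pv_foldl_insertBy_congr
  · simpa using h.of_map
  · intro a b ha hb hne
    simp only [List.nil_append] at ha hb
    have hfst : a.1 ≠ b.1 := fun e' => hne (hinj a ha b hb e')
    rcases lt_or_gt_of_ne hfst with hlt | hgt
    · simp [hlt, not_lt_of_gt hlt]
    · simp [hgt, not_lt_of_gt hgt]

-- ===== VERDICT (by name: the statement is the Claim_ definition above) =====
theorem fmt_missing_summary_py_spec : Claim_equal_fmt_missing_summary_py := by
  intro rows _ hpre
  unfold Spec_fmt_missing_summary_py fmt_missing_summary_py fmt_missing_summary_py_alt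
  by_cases hr : rows = []
  · simp [hr]
  · simp only [hr, if_false]
    have hcounts : rows.foldl (fun d row =>
        let indicator := (PySem.Dict.ofList row).getD "indicator" ""
        d.insert indicator (d.getD indicator 0 + 1)) PySem.Dict.empty
        = PySem.Dict.counter (rows.map (fun row => (PySem.Dict.ofList row).getD "indicator" "")) := by
      rw [← PySem.Dict.foldl_insert_getD_add_one_eq_counter, List.foldl_map]
    simp only [hcounts]
    set inds := rows.map (fun row => (PySem.Dict.ofList row).getD "indicator" "") with hinds
    set S := PySem.List.sorted inds (fun x => x) with hS
    have hSpair : S.Pairwise (· ≤ ·) := PySem.List.sorted_pairwise inds (fun x => x)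
    have hkeysS : (pvKeys S).Pairwise (· < ·) := pv_pvKeys_pairwise S hSpair
    have hnodupfst : ((PySem.Dict.counter inds).items.map Prod.fst).Nodup := by
      have hn := PySem.Dict.nodup_keys_counter inds
      simpa [PySem.Dict.keys] using hn
    rw [pv_sorted2_eq_sorted_fst _ hnodupfst]
    have hperm : (pvKeys S).Perm (PySem.Set.ofList inds) := by
      rw [List.perm_ext_iff_of_nodup (hkeysS.imp ne_of_lt) (PySem.Set.nodup_ofList inds)]
      intro a
      rw [pv_mem_pvKeys S hSpair a, hS, PySem.List.mem_sorted, PySem.Set.mem_ofList]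
    have hsorted_items : PySem.List.sorted (PySem.Dict.counter inds).items Prod.fst
        = (pvKeys S).map (fun k => (k, (inds.count k : Int))) := by
      apply PySem.List.sorted_eq_of_perm_of_pairwise_lt
      · rw [PySem.Dict.items_counter]
        exact hperm.map _
      · rw [List.pairwise_map]
        exact hkeysS
    rw [hsorted_items, List.map_map, pv_rle_eq S hSpair]
    refine congrArg (PySem.Str.join ", ") ?_
    apply List.map_congr_left
    intro k hk
    have hcnt : S.count k = inds.count k := (PySem.List.sorted_perm inds _ _).count_eq k
    simp [Function.comp, hcnt]
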